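-- pv_equiv track=rewrite | github.com/a-shannon/ergo-agent-sdk | src/ergo_agent/relayer/withdrawal_relayer.py | _sigma_long
-- ===== SOURCE A (Python) =====
-- def _sigma_long(n: int) -> str:
--     """Encode integer as Sigma-serialized Long (type 0x05 + zigzag VLQ)."""
--     zigzag = (n << 1) ^ (n >> 63)
--     result: list[int] = []
--     while zigzag >= 0x80:
--         result.append((zigzag & 0x7F) | 0x80)
--         zigzag >>= 7
--     result.append(zigzag)
--     return "05" + bytes(result).hex()
-- ===== SOURCE B (Python) =====
-- def _base128_digits(z: int) -> list[int]:
--     """Base-128 digits of z >= 0, least significant first, by divmod recursion."""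
--     q, r = divmod(z, 0x80)
--     return [r] if q == 0 else [r] + _base128_digits(q)
--
--
-- def _sigma_long(n: int) -> str:
--     """Encode integer as Sigma-serialized Long (type 0x05 + zigzag VLQ)."""
--     zigzag = (n << 1) ^ (n >> 63)
--     digits = _base128_digits(zigzag)
--     # each digit is < 0x80, so adding 0x80 sets the continuation bit
--     return "05" + "".join(f"{d + 0x80:02x}" for d in digits[:-1]) + f"{digits[-1]:02x}"
-- ===== Notes on version B (the rewrite author's own statement) =====
-- stated objective: alternative
-- what changed: Replaces A's bitwise shift-and-mask while loop building a byte list for bytes().hex() with a recursive arithmetic base-128 conversion via divmod, a separate pass that adds 0x80 to all digits but the last, and direct hex formatting of each group with f-strings (no bitwise ops, no bytes object).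
import Mathlib
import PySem

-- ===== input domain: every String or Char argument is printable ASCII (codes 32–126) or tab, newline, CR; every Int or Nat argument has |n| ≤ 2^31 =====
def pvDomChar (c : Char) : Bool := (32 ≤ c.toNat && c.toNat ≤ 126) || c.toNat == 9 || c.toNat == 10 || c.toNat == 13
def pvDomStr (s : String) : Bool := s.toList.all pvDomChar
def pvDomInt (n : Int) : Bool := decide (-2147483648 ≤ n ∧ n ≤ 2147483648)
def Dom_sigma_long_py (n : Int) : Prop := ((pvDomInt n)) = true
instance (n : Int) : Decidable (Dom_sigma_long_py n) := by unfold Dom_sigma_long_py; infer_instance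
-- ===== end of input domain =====

-- B replaces A's bitwise shift-and-mask emission loop by a recursive arithmetic base-128
-- conversion (divmod), a separate continuation-marking pass (+0x80 on all digits but the
-- last) and direct per-group hex formatting (alternative decomposition, same cost).

-- ===== PORT A =====
-- hex digit of k < 16 (both Pythons format bytes as two lowercase hex digits)
def pvHexDigit (k : Nat) : Char := "0123456789abcdef".toList.getD k '0'
-- bytes(result).hex()
def pvBytesHex (bs : List Int) : List Char :=
  bs.flatMap (fun b => [pvHexDigit (b.toNat / 16), pvHexDigit (b.toNat % 16)])

-- 'while zigzag >= 0x80: result.append((zigzag & 0x7F) | 0x80); zigzag >>= 7' then 'result.append(zigzag)'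
def pvALoop (z : Int) : List Int :=
  if 0x80 ≤ z then
    (PySem.Int.bor (PySem.Int.band z 0x7F) 0x80) :: pvALoop (z >>> (7 : Nat))
  else [z]
termination_by z.toNat
decreasing_by
  rw [Int.shiftRight_eq_div_pow]
  have hc : ((2 ^ 7 : Nat) : Int) = 128 := by norm_num
  rw [hc]
  omega

def sigma_long_py (n : Int) : String :=
  let zigzag := PySem.Int.bxor (n <<< (1 : Nat)) (n >>> (63 : Nat))
  String.ofList ('0' :: '5' :: pvBytesHex (pvALoop zigzag))

-- ===== PORT B =====
-- 'q, r = divmod(z, 0x80); return [r] if q == 0 else [r] + _base128_digits(q)'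
-- (guard 'q ≤ 0' instead of 'q == 0' only for totality: for z < 0 the Python helper
--  recurses forever; it is never called with z < 0 since zigzag ≥ 0 — exact for z ≥ 0)
def pvDigits (z : Int) : List Int :=
  if PySem.Int.floordiv z 0x80 ≤ 0 then [PySem.Int.mod z 0x80]
  else PySem.Int.mod z 0x80 :: pvDigits (PySem.Int.floordiv z 0x80)
termination_by z.toNat
decreasing_by
  rw [PySem.Int.floordiv_eq_ediv_of_pos (by norm_num : (0:Int) < 0x80)] at *
  omega

-- f"{x:02x}" for 0 ≤ x < 256
def pvHex2 (x : Int) : List Char := [pvHexDigit (x.toNat / 16), pvHexDigit (x.toNat % 16)]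

def sigma_long_py_alt (n : Int) : String :=
  let zigzag := PySem.Int.bxor (n <<< (1 : Nat)) (n >>> (63 : Nat))
  let digits := pvDigits zigzag
  String.ofList ('0' :: '5' ::
    (digits.dropLast.flatMap (fun d => pvHex2 (d + 0x80)) ++ pvHex2 digits.getLast!))

-- ===== PRECONDITION & SPEC =====
def Spec_sigma_long_py (n : Int) (out : String) : Prop := out = sigma_long_py_alt n
instance (n : Int) (out : String) : Decidable (Spec_sigma_long_py n out) := by unfold Spec_sigma_long_py; infer_instance

-- ===== CLAIM (what is proved, stated in full; the proofs are below) =====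
def Claim_equal_sigma_long_py : Prop := ∀ (n : Int), Dom_sigma_long_py n → Spec_sigma_long_py n (sigma_long_py n)

-- ===== LEMMAS AND PROOFS =====

lemma pv_cast_shift7 (m : Nat) : ((m : Int) >>> (7 : Nat)) = ((m / 128 : Nat) : Int) := by
  rw [← Int.natCast_shiftRight, Nat.shiftRight_eq_div_pow]

lemma pv_floordiv_cast (m : Nat) : PySem.Int.floordiv (m : Int) 0x80 = ((m / 128 : Nat) : Int) := by
  exact_mod_cast PySem.Int.floordiv_natCast m 128

lemma pv_mod_cast (m : Nat) : PySem.Int.mod (m : Int) 0x80 = ((m % 128 : Nat) : Int) := by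
  exact_mod_cast PySem.Int.mod_natCast m 128

lemma pv_digits_small (m : Nat) (h : m < 128) : pvDigits (m : Int) = [(m : Int)] := by
  rw [pvDigits.eq_def, pv_floordiv_cast, pv_mod_cast,
    if_pos (by exact_mod_cast Int.natCast_nonpos_iff.mpr (by omega : m / 128 = 0))]
  congr 1
  omega

lemma pv_digits_step (m : Nat) (h : 128 ≤ m) :
    pvDigits (m : Int) = ((m % 128 : Nat) : Int) :: pvDigits ((m / 128 : Nat) : Int) := by
  rw [pvDigits.eq_def, pv_floordiv_cast, pv_mod_cast, if_neg (by push_cast; omega)]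

lemma pv_digits_ne_nil (z : Int) : pvDigits z ≠ [] := by
  rw [pvDigits.eq_def]
  split <;> simp

lemma pv_or_128_fin : ∀ a : Fin 128, (a : Nat) ||| 128 = a + 128 := by decide

lemma pv_or_128 (a : Nat) (h : a < 128) : a ||| 128 = a + 128 := pv_or_128_fin ⟨a, h⟩

lemma pv_getLast!_cons (a : Int) (l : List Int) (h : l ≠ []) : (a :: l).getLast! = l.getLast! := by
  cases l with
  | nil => simp at h
  | cons b t => rfl

-- the heart: A's emission loop equals B's marked digit list
lemma pv_key (m : Nat) :
    pvALoop (m : Int) =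
      (pvDigits (m : Int)).dropLast.map (· + 0x80) ++ [(pvDigits (m : Int)).getLast!] := by
  induction m using Nat.strong_induction_on with
  | _ m ih =>
    by_cases h : 128 ≤ m
    · rw [pvALoop, if_pos (by exact_mod_cast h : (0x80:Int) ≤ ↑m), pv_cast_shift7,
          ih (m / 128) (by omega), pv_digits_step m h]
      have hne := pv_digits_ne_nil ((m / 128 : Nat) : Int)
      rw [List.dropLast_cons_of_ne_nil hne, pv_getLast!_cons _ _ hne]
      rw [List.map_cons, List.cons_append]
      congr 1
      rw [show (0x7F : Int) = ((127 : Nat) : Int) by norm_num, PySem.Int.band_natCast,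
          show (0x80 : Int) = ((128 : Nat) : Int) by norm_num, PySem.Int.bor_natCast]
      have h127 : m &&& 127 = m % 128 := by simpa using Nat.and_two_pow_sub_one_eq_mod m 7
      rw [h127, pv_or_128 (m % 128) (by omega)]
      push_cast
      ring
    · rw [pvALoop, if_neg (by exact_mod_cast h : ¬ (0x80:Int) ≤ ↑m), pv_digits_small m (by omega)]
      simp [List.getLast!]

lemma pv_bxor_neg_one (a : Int) : PySem.Int.bxor a (-1) = -a - 1 := by
  unfold PySem.Int.bxor
  split_ifs with h1 h2 h2 <;> simp_all

lemma pv_zig_nonneg (n : Int) (h1 : -2147483648 ≤ n) (h2 : n ≤ 2147483648) :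
    0 ≤ PySem.Int.bxor (n <<< (1 : Nat)) (n >>> (63 : Nat)) := by
  rw [Int.shiftLeft_eq, Int.shiftRight_eq_div_pow]
  by_cases hn : 0 ≤ n
  · have : n / ((2 ^ 63 : Nat) : Int) = 0 := by push_cast; omega
    rw [this, PySem.Int.bxor_zero]
    positivity
  · have : n / ((2 ^ 63 : Nat) : Int) = -1 := by push_cast; omega
    rw [this, pv_bxor_neg_one]
    nlinarith

-- ===== VERDICT (by name: the statement is the Claim_ definition above) =====
theorem sigma_long_py_spec : Claim_equal_sigma_long_py := by
  intro n hdom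
  have hd : -2147483648 ≤ n ∧ n ≤ 2147483648 := by
    simpa [Dom_sigma_long_py, pvDomInt] using hdom
  unfold Spec_sigma_long_py sigma_long_py sigma_long_py_alt
  have hnn := pv_zig_nonneg n hd.1 hd.2
  set z := PySem.Int.bxor (n <<< (1 : Nat)) (n >>> (63 : Nat)) with hz
  have hcast : z = ((z.toNat : Nat) : Int) := (Int.toNat_of_nonneg hnn).symm
  rw [hcast]
  show String.ofList ('0' :: '5' :: pvBytesHex (pvALoop ((z.toNat : Nat) : Int))) =
    String.ofList ('0' :: '5' ::
      ((pvDigits ((z.toNat : Nat) : Int)).dropLast.flatMap (fun d => pvHex2 (d + 0x80)) ++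
        pvHex2 (pvDigits ((z.toNat : Nat) : Int)).getLast!))
  rw [pv_key z.toNat]
  simp only [pvBytesHex, pvHex2, List.flatMap_append, List.flatMap_map, List.flatMap_cons,
    List.flatMap_nil, List.append_nil]
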